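-- pv_equiv track=rewrite | github.com/igorFNegrizoli/bioinformatics-python | motifs.py | ScoreWithPseudocounts
-- ===== SOURCE A (Python) =====
-- def Count(Motifs):
--     count = {}
--     k = len(Motifs[0])
--     for symbol in "ACGT":
--         count[symbol] = []
--         for j in range(k):
--              count[symbol].append(0)
--     t = len(Motifs)
--     for i in range(t):
--         for j in range(k):
--             symbol = Motifs[i][j]
--             count[symbol][j] += 1
--     return count
--
-- def Consensus(Motifs):
--     consensus = ""
--     count = Count(Motifs)
--     k = len(Motifs[0])
--     for j in range(k):
--         m = 0
--         frequentSymbol = ""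
--         for symbol in "ACGT":
--             if count[symbol][j] > m:
--                 m = count[symbol][j]
--                 frequentSymbol = symbol
--         consensus += frequentSymbol
--     return consensus
--
-- def ScoreWithPseudocounts(Motifs):
--     score = 0
--     consensus = Consensus(Motifs)
--     lenStr = len(Motifs[0])
--     lenMotifs = len(Motifs)
--     for i in range(lenMotifs):
--         for j in range(lenStr):
--             if consensus[j] != Motifs[i][j]:
--                 score += 1
--     return score
-- ===== SOURCE B (Python) =====
-- def ScoreWithPseudocounts(Motifs):
--     t = len(Motifs)
--     return sum(t - max(col.count(s) for s in "ACGT") for col in zip(*Motifs))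
-- ===== Notes on version B (the rewrite author's own statement) =====
-- stated objective: simpler
-- what changed: B never builds the 4xk count table or the consensus string: it transposes the motifs with zip(*Motifs) and, per column, adds t minus the column's maximum symbol count (which equals the count of the consensus symbol), replacing Count+Consensus+full t*k rescan by a one-line column-wise aggregation.
import Mathlib
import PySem

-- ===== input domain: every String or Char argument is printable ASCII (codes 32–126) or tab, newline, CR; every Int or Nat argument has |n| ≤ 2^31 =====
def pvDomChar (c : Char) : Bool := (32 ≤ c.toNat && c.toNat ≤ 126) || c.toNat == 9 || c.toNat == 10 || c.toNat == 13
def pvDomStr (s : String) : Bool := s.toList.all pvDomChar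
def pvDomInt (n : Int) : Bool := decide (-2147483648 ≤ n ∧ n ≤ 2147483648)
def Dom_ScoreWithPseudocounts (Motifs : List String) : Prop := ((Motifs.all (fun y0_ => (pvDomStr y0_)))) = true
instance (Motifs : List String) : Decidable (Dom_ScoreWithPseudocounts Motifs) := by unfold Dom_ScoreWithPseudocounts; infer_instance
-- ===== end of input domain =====

-- B replaces A's count-table + consensus construction + full t×k rescan by a single
-- column-wise pass over zip(*Motifs) (score += t - column max count): simpler, same cost.

-- ===== PORT A =====
-- Count(Motifs): the per-symbol, per-column count table
def pyCount (Motifs : List String) : PySem.Dict Char (List Int) :=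
  let k : Int := PySem.Str.len (PySem.List.pyGetD Motifs 0 "")
  -- for symbol in "ACGT": count[symbol] = []; append k zeros
  let count : PySem.Dict Char (List Int) :=
    ("ACGT".toList).foldl
      (fun d symbol =>
        d.insert symbol ((PySem.List.pyRange 0 k 1).foldl (fun l _ => l ++ [(0 : Int)]) []))
      PySem.Dict.empty
  let t : Int := PySem.List.len Motifs
  (PySem.List.pyRange 0 t 1).foldl
    (fun d i =>
      (PySem.List.pyRange 0 k 1).foldl
        (fun d j =>
          let symbol : Char := (PySem.Str.pyGet? (PySem.List.pyGetD Motifs i "") j).getD ' '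
          -- count[symbol][j] += 1
          d.modify symbol []
            (fun l => PySem.List.pySetD l j (PySem.List.pyGetD l j 0 + 1)))
        d)
    count

-- Consensus(Motifs), built over List Char (Python's consensus string)
def pyConsensus (Motifs : List String) : List Char :=
  let count := pyCount Motifs
  let k : Int := PySem.Str.len (PySem.List.pyGetD Motifs 0 "")
  (PySem.List.pyRange 0 k 1).foldl
    (fun consensus j =>
      let p : Int × List Char :=
        ("ACGT".toList).foldl
          (fun p symbol =>
            if PySem.List.pyGetD (count.getD symbol []) j 0 > p.1 then
              (PySem.List.pyGetD (count.getD symbol []) j 0, [symbol])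
            else p)
          (0, [])
      consensus ++ p.2)
    []

def ScoreWithPseudocounts (Motifs : List String) : Int :=
  let consensus := pyConsensus Motifs
  let lenStr : Int := PySem.Str.len (PySem.List.pyGetD Motifs 0 "")
  let lenMotifs : Int := PySem.List.len Motifs
  (PySem.List.pyRange 0 lenMotifs 1).foldl
    (fun score i =>
      (PySem.List.pyRange 0 lenStr 1).foldl
        (fun score j =>
          if PySem.List.pyGetD consensus j ' ' ≠
              (PySem.Str.pyGet? (PySem.List.pyGetD Motifs i "") j).getD ' ' then
            score + 1
          else score)
        score)
    0

-- ===== PORT B =====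
-- zip(*Motifs): the list of columns, truncated to the shortest motif
def pyZipStar (Motifs : List String) : List (List Char) :=
  let n : Nat := ((Motifs.map (fun s => s.toList.length)).min?).getD 0
  (List.range n).map (fun j => Motifs.map (fun s => s.toList.getD j ' '))

def ScoreWithPseudocounts_alt (Motifs : List String) : Int :=
  let t : Int := Motifs.length
  ((pyZipStar Motifs).map
    (fun col =>
      t - (PySem.List.max? (("ACGT".toList).map (fun s => (col.count s : Int)))
             (fun x => x)).getD 0)).sum

-- ===== PRECONDITION & SPEC =====
-- Pre_ excludes exactly the inputs on which A raises: the empty list (IndexError on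
-- Motifs[0]), a motif shorter than Motifs[0] (IndexError), and a non-ACGT character in
-- the first len(Motifs[0]) positions of a motif (KeyError in Count).
def Pre_ScoreWithPseudocounts (Motifs : List String) : Prop :=
  Motifs ≠ [] ∧ ∀ s ∈ Motifs,
    (Motifs.headD "").toList.length ≤ s.toList.length ∧
    ∀ j : Nat, j < (Motifs.headD "").toList.length →
      s.toList.getD j ' ' ∈ (['A', 'C', 'G', 'T'] : List Char)
instance (Motifs : List String) : Decidable (Pre_ScoreWithPseudocounts Motifs) := by
  unfold Pre_ScoreWithPseudocounts; infer_instance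
def pvWitness_ScoreWithPseudocounts : List String := ["ACGT", "AAGT", "ACGTT"]
def Spec_ScoreWithPseudocounts (Motifs : List String) (out : Int) : Prop := out = ScoreWithPseudocounts_alt Motifs
instance (Motifs : List String) (out : Int) : Decidable (Spec_ScoreWithPseudocounts Motifs out) := by unfold Spec_ScoreWithPseudocounts; infer_instance

-- ===== CLAIM (what is proved, stated in full; the proofs are below) =====
def Claim_equal_ScoreWithPseudocounts : Prop := ∀ (Motifs : List String), Dom_ScoreWithPseudocounts Motifs → Pre_ScoreWithPseudocounts Motifs → Spec_ScoreWithPseudocounts Motifs (ScoreWithPseudocounts Motifs)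

-- ===== LEMMAS AND PROOFS =====

def pvACGT : List Char := ['A', 'C', 'G', 'T']

def pvCol (Motifs : List String) (j : Nat) : List Char :=
  Motifs.map (fun s => s.toList.getD j ' ')

def pvInner (k : Nat) (a : Int) (m : String) (d : PySem.Dict Char (List Int)) :
    PySem.Dict Char (List Int) :=
  (PySem.List.pyRange a (k : Int) 1).foldl
    (fun d j =>
      let symbol : Char := (PySem.Str.pyGet? m j).getD ' '
      d.modify symbol []
        (fun l => PySem.List.pySetD l j (PySem.List.pyGetD l j 0 + 1)))
    d

def pvInit (k : Nat) : PySem.Dict Char (List Int) :=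
  ("ACGT".toList).foldl
    (fun d symbol =>
      d.insert symbol
        ((PySem.List.pyRange 0 (k : Int) 1).foldl (fun l _ => l ++ [(0 : Int)]) []))
    PySem.Dict.empty

def pvSel (Motifs : List String) (j : Int) : Int × List Char :=
  ("ACGT".toList).foldl
    (fun p symbol =>
      if PySem.List.pyGetD ((pyCount Motifs).getD symbol []) j 0 > p.1 then
        (PySem.List.pyGetD ((pyCount Motifs).getD symbol []) j 0, [symbol])
      else p)
    (0, [])

lemma pv_sym_eq (m : String) (a : Nat) :
    (PySem.Str.pyGet? m (a : Int)).getD ' ' = m.toList.getD a ' ' := by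
  rw [PySem.Str.pyGet?_eq]
  simp [PySem.Chars.pyGet?, List.getD_eq_getElem?_getD]

lemma pv_len0 (Motifs : List String) (h : Motifs ≠ []) :
    PySem.Str.len (PySem.List.pyGetD Motifs 0 "") = ((Motifs.headD "").toList.length : Int) := by
  rw [PySem.List.pyGetD_zero, PySem.Str.len_eq]
  cases Motifs with
  | nil => simp at h
  | cons x xs => simp

lemma pvInner_spec (k : Nat) (m : String) :
    ∀ (n a : Nat), k - a = n →
    ∀ d : PySem.Dict Char (List Int),
      (∀ c ∈ pvACGT, ((d.getD c [] : List Int)).length = k) →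
      ((∀ c ∈ pvACGT, ((pvInner k (a : Int) m d).getD c []).length = k) ∧
       (∀ c ∈ pvACGT, ∀ j : Nat, j < k →
         PySem.List.pyGetD ((pvInner k (a : Int) m d).getD c []) (j : Int) 0 =
           PySem.List.pyGetD (d.getD c []) (j : Int) 0 +
             (if a ≤ j ∧ m.toList.getD j ' ' = c then 1 else 0))) := by
  intro n
  induction n with
  | zero =>
    intro a ha d hd
    have hnil : PySem.List.pyRange (a : Int) (k : Int) 1 = [] :=
      PySem.List.pyRange_one_eq_nil (by exact_mod_cast Nat.le_of_sub_eq_zero ha)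
    unfold pvInner
    rw [hnil]
    simp only [List.foldl_nil]
    refine ⟨hd, fun c hc j hj => ?_⟩
    have : ¬ (a ≤ j ∧ m.toList.getD j ' ' = c) := by
      intro ⟨h1, _⟩; omega
    rw [if_neg this, add_zero]
  | succ n ih =>
    intro a ha d hd
    have hak : a < k := by omega
    unfold pvInner
    rw [PySem.List.pyRange_one_cons (by exact_mod_cast hak )]
    simp only [List.foldl_cons]
    have hcast : ((a : Int) + 1) = ((a + 1 : Nat) : Int) := by push_cast; ring
    set sym := (PySem.Str.pyGet? m (a : Int)).getD ' ' with hsymdef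
    have hsym : sym = m.toList.getD a ' ' := pv_sym_eq m a
    set d1 := d.modify sym [] (fun l => PySem.List.pySetD l (a : Int) (PySem.List.pyGetD l (a : Int) 0 + 1)) with hd1def
    have hd1 : ∀ c ∈ pvACGT, ((d1.getD c [] : List Int)).length = k := by
      intro c hc
      rw [hd1def, PySem.Dict.getD_modify]
      split_ifs with h
      · rw [PySem.List.length_pySetD, ← h]; exact hd c hc
      · exact hd c hc
    have hval1 : ∀ c ∈ pvACGT, ∀ j : Nat, j < k →
        PySem.List.pyGetD (d1.getD c []) (j : Int) 0 =
          PySem.List.pyGetD (d.getD c []) (j : Int) 0 +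
            (if j = a ∧ m.toList.getD j ' ' = c then 1 else 0) := by
      intro c hc j hj
      rw [hd1def, PySem.Dict.getD_modify]
      split_ifs with h h2 h2
      · -- c = sym
        have hlen : a < (d.getD sym []).length := by
          rw [← h] at *
          rw [hd c hc]; exact hak
        rw [PySem.List.pyGetD_pySetD_natCast _ _ _ _ _ hlen]
        rcases h2 with ⟨rfl, _⟩
        simp [← h]
      · -- c = sym but j ≠ a or char mismatch
        have hlen : a < (d.getD sym []).length := by
          rw [← h] at *
          rw [hd c hc]; exact hak
        rw [PySem.List.pyGetD_pySetD_natCast _ _ _ _ _ hlen]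
        have hja : ¬ j = a := by
          intro hja
          exact h2 ⟨hja, by rw [← hja] at hsym; rw [← hsym, h]⟩
        rw [if_neg hja, ← h, add_zero]
      · -- c ≠ sym but indicator true: contradiction
        exfalso
        rcases h2 with ⟨rfl, hcc⟩
        exact h (by rw [← hcc, hsym])
      · rw [add_zero]
    obtain ⟨ihlen, ihval⟩ := ih (a + 1) (by omega) d1 hd1
    unfold pvInner at ihlen ihval
    rw [hcast]
    constructor
    · intro c hc
      exact ihlen c hc
    · intro c hc j hj
      rw [ihval c hc j hj, hval1 c hc j hj]
      by_cases hP : m.toList.getD j ' ' = c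
      · simp only [hP, and_true]
        split_ifs <;> omega
      · simp only [hP, and_false, if_false, add_zero]

lemma pvLoop_spec (k : Nat) :
    ∀ (ms : List String) (d : PySem.Dict Char (List Int)),
      (∀ c ∈ pvACGT, ((d.getD c [] : List Int)).length = k) →
      ((∀ c ∈ pvACGT, ((ms.foldl (fun d m => pvInner k 0 m d) d).getD c []).length = k) ∧
       (∀ c ∈ pvACGT, ∀ j : Nat, j < k →
         PySem.List.pyGetD ((ms.foldl (fun d m => pvInner k 0 m d) d).getD c []) (j : Int) 0 =
           PySem.List.pyGetD (d.getD c []) (j : Int) 0 +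
             ((ms.map (fun s => s.toList.getD j ' ')).count c : Int))) := by
  intro ms
  induction ms with
  | nil =>
    intro d hd
    refine ⟨hd, fun c hc j hj => ?_⟩
    simp
  | cons m rest ih =>
    intro d hd
    have hstep := pvInner_spec k m k 0 (by omega) d hd
    rw [Nat.cast_zero] at hstep
    obtain ⟨h1len, h1val⟩ := hstep
    obtain ⟨ihlen, ihval⟩ := ih (pvInner k 0 m d) h1len
    simp only [List.foldl_cons]
    refine ⟨ihlen, fun c hc j hj => ?_⟩
    rw [ihval c hc j hj, h1val c hc j hj]
    simp only [Nat.zero_le, true_and, List.map_cons, List.count_cons, beq_iff_eq]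
    by_cases hP : m.toList.getD j ' ' = c
    · simp only [hP, if_true]
      push_cast; ring
    · simp only [hP, if_false]
      push_cast; ring

lemma pyCount_eq (Motifs : List String) (hne : Motifs ≠ []) :
    pyCount Motifs =
      Motifs.foldl (fun d m => pvInner ((Motifs.headD "").toList.length) 0 m d)
        (pvInit ((Motifs.headD "").toList.length)) := by
  unfold pyCount
  rw [pv_len0 Motifs hne]
  simp only []
  change List.foldl
      (fun d i => pvInner ((Motifs.headD "").toList.length) 0 (PySem.List.pyGetD Motifs i "") d)
      (pvInit ((Motifs.headD "").toList.length))
      (PySem.List.pyRange 0 (PySem.List.len Motifs) 1) = _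
  rw [PySem.List.foldl_pyRange_pyGetD Motifs ""
      (fun d m => pvInner ((Motifs.headD "").toList.length) 0 m d) _ (le_refl 0)]
  rw [Int.toNat_zero, List.drop_zero]

lemma pv_init_getD (k : Nat) (c : Char) (hc : c ∈ pvACGT) :
    (pvInit k).getD c [] = List.replicate k 0 := by
  have hz : ((PySem.List.pyRange 0 (k : Int) 1).foldl (fun l _ => l ++ [(0 : Int)]) []) =
      List.replicate k 0 := by
    rw [PySem.List.foldl_append_singleton_eq_map (fun _ => (0 : Int))]
    rw [List.map_const']
    simp [PySem.List.length_pyRange_one]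
  have ha : "ACGT".toList = ['A', 'C', 'G', 'T'] := rfl
  unfold pvInit
  rw [ha]
  simp only [List.foldl_cons, List.foldl_nil, hz]
  simp only [pvACGT, List.mem_cons, List.not_mem_nil, or_false] at hc
  rcases hc with rfl | rfl | rfl | rfl <;>
    simp [PySem.Dict.getD_insert]

lemma pyCount_getD (Motifs : List String) (hne : Motifs ≠ [])
    (c : Char) (hc : c ∈ pvACGT) (j : Nat) (hj : j < (Motifs.headD "").toList.length) :
    PySem.List.pyGetD ((pyCount Motifs).getD c []) (j : Int) 0 =
      ((pvCol Motifs j).count c : Int) := by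
  rw [pyCount_eq Motifs hne]
  have hinit : ∀ c' ∈ pvACGT,
      (((pvInit ((Motifs.headD "").toList.length)).getD c' [] : List Int)).length =
        (Motifs.headD "").toList.length := by
    intro c' hc'
    rw [pv_init_getD _ c' hc']
    simp
  obtain ⟨_, hval⟩ := pvLoop_spec ((Motifs.headD "").toList.length) Motifs
      (pvInit ((Motifs.headD "").toList.length)) hinit
  rw [hval c hc j hj, pv_init_getD _ c hc, PySem.List.pyGetD_natCast]
  have hj' : j < (Motifs.head?.getD "").length := by simpa using hj
  simp [pvCol, List.getD_eq_getElem?_getD, hj']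

lemma pv_fold4 (cntf : Char → Int)
    (hpos : 0 < cntf 'A' + cntf 'C' + cntf 'G' + cntf 'T') :
    ∃ ch ∈ pvACGT,
      ((['A', 'C', 'G', 'T'] : List Char).foldl
          (fun p s => if cntf s > p.1 then (cntf s, [s]) else p)
          ((0 : Int), ([] : List Char))) = (cntf ch, [ch]) ∧
      ∀ s ∈ pvACGT, cntf s ≤ cntf ch := by
  simp only [List.foldl_cons, List.foldl_nil]
  split_ifs <;>
  first
  | (refine ⟨_, by decide, rfl, ?_⟩
     intro s hs
     simp only [pvACGT, List.mem_cons, List.not_mem_nil, or_false] at hs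
     rcases hs with rfl | rfl | rfl | rfl <;> omega)
  | (exfalso; omega)

lemma pv_count4 (col : List Char) (h : ∀ x ∈ col, x ∈ pvACGT) :
    col.length = col.count 'A' + col.count 'C' + col.count 'G' + col.count 'T' := by
  induction col with
  | nil => simp
  | cons x xs ih =>
    have hx := h x (by simp)
    have ih' := ih (fun y hy => h y (by simp [hy]))
    simp only [pvACGT, List.mem_cons, List.not_mem_nil, or_false] at hx
    rcases hx with rfl | rfl | rfl | rfl <;>
      simp_all <;> omega

lemma pvSel_spec (Motifs : List String) (hne : Motifs ≠ [])
    (hall : ∀ s ∈ Motifs, ∀ j : Nat, j < (Motifs.headD "").toList.length →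
      s.toList.getD j ' ' ∈ pvACGT)
    (j : Nat) (hj : j < (Motifs.headD "").toList.length) :
    ∃ ch ∈ pvACGT,
      pvSel Motifs (j : Int) = (((pvCol Motifs j).count ch : Int), [ch]) ∧
      ∀ s ∈ pvACGT, ((pvCol Motifs j).count s : Int) ≤ ((pvCol Motifs j).count ch : Int) := by
  have hcnt : ∀ c ∈ pvACGT,
      PySem.List.pyGetD ((pyCount Motifs).getD c []) (j : Int) 0 =
        ((pvCol Motifs j).count c : Int) :=
    fun c hc => pyCount_getD Motifs hne c hc j hj
  have hcol : ∀ x ∈ pvCol Motifs j, x ∈ pvACGT := by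
    intro x hx
    simp only [pvCol, List.mem_map] at hx
    obtain ⟨s, hs, rfl⟩ := hx
    exact hall s hs j hj
  have hlen : 0 < (pvCol Motifs j).length := by
    simp only [pvCol, List.length_map]
    exact List.length_pos_of_ne_nil hne
  have hpos : 0 < ((pvCol Motifs j).count 'A' : Int) + ((pvCol Motifs j).count 'C' : Int) +
      ((pvCol Motifs j).count 'G' : Int) + ((pvCol Motifs j).count 'T' : Int) := by
    have := pv_count4 (pvCol Motifs j) hcol
    omega
  obtain ⟨ch, hch, heq, hmax⟩ :=
    pv_fold4 (fun s => ((pvCol Motifs j).count s : Int)) hpos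
  refine ⟨ch, hch, ?_, hmax⟩
  unfold pvSel
  have ha : "ACGT".toList = ['A', 'C', 'G', 'T'] := rfl
  rw [ha]
  have hfg : (['A', 'C', 'G', 'T'] : List Char).foldl
      (fun (p : Int × List Char) symbol =>
        if PySem.List.pyGetD ((pyCount Motifs).getD symbol []) (j : Int) 0 > p.1 then
          (PySem.List.pyGetD ((pyCount Motifs).getD symbol []) (j : Int) 0, [symbol])
        else p) ((0 : Int), ([] : List Char)) =
      (['A', 'C', 'G', 'T'] : List Char).foldl
      (fun (p : Int × List Char) s =>
        if ((pvCol Motifs j).count s : Int) > p.1 then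
          (((pvCol Motifs j).count s : Int), [s]) else p) ((0 : Int), ([] : List Char)) :=
    PySem.List.foldl_congr_mem ['A', 'C', 'G', 'T']
      (fun (p : Int × List Char) symbol =>
        if PySem.List.pyGetD ((pyCount Motifs).getD symbol []) (j : Int) 0 > p.1 then
          (PySem.List.pyGetD ((pyCount Motifs).getD symbol []) (j : Int) 0, [symbol])
        else p)
      (fun (p : Int × List Char) s =>
        if ((pvCol Motifs j).count s : Int) > p.1 then
          (((pvCol Motifs j).count s : Int), [s]) else p)
      ((0 : Int), ([] : List Char))
      (fun acc s hs => by beta_reduce; rw [hcnt s hs])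
  rw [hfg]
  exact heq

lemma pv_flatMap_singleton {α β : Type} (l : List α) (g : α → List β) (h : α → β)
    (hg : ∀ x ∈ l, g x = [h x]) : l.flatMap g = l.map h := by
  induction l with
  | nil => simp
  | cons x xs ih =>
    simp only [List.flatMap_cons, hg x (by simp)]
    rw [ih (fun y hy => hg y (by simp [hy]))]
    rfl

lemma pyConsensus_eq (Motifs : List String) (hne : Motifs ≠ [])
    (hall : ∀ s ∈ Motifs, ∀ j : Nat, j < (Motifs.headD "").toList.length →
      s.toList.getD j ' ' ∈ pvACGT) :
    pyConsensus Motifs =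
      (PySem.List.pyRange 0 (((Motifs.headD "").toList.length : Int)) 1).map
        (fun j => (pvSel Motifs j).2.headD ' ') := by
  unfold pyConsensus
  rw [pv_len0 Motifs hne]
  simp only []
  change List.foldl (fun acc j => acc ++ (pvSel Motifs j).2) []
      (PySem.List.pyRange 0 (((Motifs.headD "").toList.length : Int)) 1) = _
  rw [PySem.List.foldl_append_eq_flatMap (fun j => (pvSel Motifs j).2)]
  rw [List.nil_append]
  apply pv_flatMap_singleton
  intro x hx
  rw [PySem.List.mem_pyRange_one] at hx
  obtain ⟨hx0, hxk⟩ := hx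
  have hxe : x = ((x.toNat : Nat) : Int) := by omega
  rw [hxe]
  obtain ⟨ch, hch, heq, _⟩ := pvSel_spec Motifs hne hall x.toNat (by omega)
  rw [heq]
  rfl

lemma pv_sum_swap {α β : Type} (l1 : List α) (l2 : List β) (f : α → β → Int) :
    (l1.map (fun a => (l2.map (f a)).sum)).sum =
      (l2.map (fun b => (l1.map (fun a => f a b)).sum)).sum := by
  induction l1 with
  | nil => simp [List.map_const']
  | cons x xs ih =>
    simp only [List.map_cons, List.sum_cons, ih]
    rw [← PySem.List.sum_map_add_int]

lemma pv_count_ne (col : List Char) (ch : Char) :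
    (col.map (fun x => if ch ≠ x then (1 : Int) else 0)).sum =
      (col.length : Int) - (col.count ch : Int) := by
  induction col with
  | nil => simp
  | cons x xs ih =>
    rcases eq_or_ne ch x with rfl | hx
    · simp only [List.map_cons, List.sum_cons, ne_eq, not_true_eq_false, if_false,
        List.count_cons_self, List.length_cons, ih]
      push_cast; ring
    · simp only [List.map_cons, List.sum_cons, ne_eq, hx, not_false_eq_true, if_true,
        List.length_cons, ih, List.count_cons_of_ne (fun h => hx (Eq.symm h))]
      push_cast; ring

lemma pv_min_eq (Motifs : List String) (hne : Motifs ≠ [])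
    (hlen : ∀ s ∈ Motifs, (Motifs.headD "").toList.length ≤ s.toList.length) :
    ((Motifs.map (fun s => s.toList.length)).min?).getD 0 =
      (Motifs.headD "").toList.length := by
  have hm : (Motifs.map (fun s => s.toList.length)).min? =
      some ((Motifs.headD "").toList.length) := by
    rw [List.min?_eq_some_iff]
    constructor
    · cases Motifs with
      | nil => simp at hne
      | cons x xs => simp
    · intro b hb
      simp only [List.mem_map] at hb
      obtain ⟨s, hs, rfl⟩ := hb
      exact hlen s hs
  rw [hm]
  rfl

lemma pv_max_eq (Motifs : List String) (hne : Motifs ≠ [])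
    (hall : ∀ s ∈ Motifs, ∀ j : Nat, j < (Motifs.headD "").toList.length →
      s.toList.getD j ' ' ∈ pvACGT)
    (j : Nat) (hj : j < (Motifs.headD "").toList.length) :
    (PySem.List.max? (("ACGT".toList).map (fun s => ((pvCol Motifs j).count s : Int)))
        (fun x => x)).getD 0 =
      ((pvCol Motifs j).count ((pvSel Motifs (j : Int)).2.headD ' ') : Int) := by
  obtain ⟨ch, hch, heq, hmax⟩ := pvSel_spec Motifs hne hall j hj
  rw [heq]
  show _ = ((pvCol Motifs j).count ch : Int)
  cases hmx : PySem.List.max? (("ACGT".toList).map (fun s => ((pvCol Motifs j).count s : Int)))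
      (fun x => x) with
  | none =>
    rw [PySem.List.max?_eq_none_iff] at hmx
    simp at hmx
  | some m' =>
    have hmem := PySem.List.max?_mem hmx
    simp only [List.mem_map] at hmem
    obtain ⟨s, hs, rfl⟩ := hmem
    have h1 : ((pvCol Motifs j).count s : Int) ≤ ((pvCol Motifs j).count ch : Int) :=
      hmax s hs
    have h2 := PySem.List.max?_isMax hmx (((pvCol Motifs j).count ch : Int))
      (List.mem_map.mpr ⟨ch, hch, rfl⟩)
    simp only [Option.getD_some]
    exact le_antisymm h1 h2

theorem pv_main (Motifs : List String) (hpre : Pre_ScoreWithPseudocounts Motifs) :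
    ScoreWithPseudocounts Motifs = ScoreWithPseudocounts_alt Motifs := by
  obtain ⟨hne, hall0⟩ := hpre
  have hlen : ∀ s ∈ Motifs, (Motifs.headD "").toList.length ≤ s.toList.length :=
    fun s hs => (hall0 s hs).1
  have hall : ∀ s ∈ Motifs, ∀ j : Nat, j < (Motifs.headD "").toList.length →
      s.toList.getD j ' ' ∈ pvACGT :=
    fun s hs j hj => (hall0 s hs).2 j hj
  set k := (Motifs.headD "").toList.length with hk
  -- the consensus character of column j
  set chAt : Int → Char := fun j => (pvSel Motifs j).2.headD ' ' with hchAt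
  -- A: peel the outer loop into a fold over the motifs themselves
  unfold ScoreWithPseudocounts
  rw [pv_len0 Motifs hne]
  simp only []
  rw [PySem.List.foldl_pyRange_pyGetD Motifs ""
      (fun score m =>
        (PySem.List.pyRange 0 (k : Int) 1).foldl
          (fun score j =>
            if PySem.List.pyGetD (pyConsensus Motifs) j ' ' ≠
                (PySem.Str.pyGet? m j).getD ' ' then score + 1
            else score) score)
      0 (le_refl 0)]
  rw [Int.toNat_zero, List.drop_zero]
  -- the inner loop counts mismatches: turn it into a sum of 0/1 indicators
  have hinner : ∀ (score : Int) (m : String),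
      (PySem.List.pyRange 0 (k : Int) 1).foldl
        (fun score j =>
          if PySem.List.pyGetD (pyConsensus Motifs) j ' ' ≠
              (PySem.Str.pyGet? m j).getD ' ' then score + 1
          else score) score =
      score + ((PySem.List.pyRange 0 (k : Int) 1).map
        (fun j => if PySem.List.pyGetD (pyConsensus Motifs) j ' ' ≠
            (PySem.Str.pyGet? m j).getD ' ' then (1 : Int) else 0)).sum := by
    intro score m
    rw [PySem.List.foldl_ite_add_one
        (fun j => PySem.List.pyGetD (pyConsensus Motifs) j ' ' ≠
          (PySem.Str.pyGet? m j).getD ' ')]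
    rw [← PySem.List.sum_map_ite_one_zero
        (fun j => decide (PySem.List.pyGetD (pyConsensus Motifs) j ' ' ≠
          (PySem.Str.pyGet? m j).getD ' '))]
    simp only [decide_eq_true_eq]
  rw [PySem.List.foldl_congr_mem Motifs _
      (fun score m => score + ((PySem.List.pyRange 0 (k : Int) 1).map
        (fun j => if PySem.List.pyGetD (pyConsensus Motifs) j ' ' ≠
            (PySem.Str.pyGet? m j).getD ' ' then (1 : Int) else 0)).sum)
      0 (fun acc m _ => hinner acc m)]
  rw [PySem.List.foldl_add]
  rw [zero_add]
  rw [pv_sum_swap Motifs (PySem.List.pyRange 0 (k : Int) 1)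
      (fun m j => if PySem.List.pyGetD (pyConsensus Motifs) j ' ' ≠
          (PySem.Str.pyGet? m j).getD ' ' then (1 : Int) else 0)]
  -- B: the column list is List.range k
  unfold ScoreWithPseudocounts_alt pyZipStar
  simp only []
  rw [pv_min_eq Motifs hne hlen]
  -- both sides are sums over the k columns
  rw [PySem.List.pyRange_one 0 (k : Int)]
  simp only [Int.sub_zero, Int.toNat_natCast, List.map_map]
  apply congrArg List.sum
  apply List.map_congr_left
  intro i hi
  have hik : i < k := List.mem_range.mp hi
  simp only [Function.comp]
  -- the consensus character of column i
  have hcons : PySem.List.pyGetD (pyConsensus Motifs) ((0 : Int) + (i : Int)) ' ' =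
      chAt (i : Int) := by
    rw [pyConsensus_eq Motifs hne hall, zero_add]
    exact PySem.List.pyGetD_map_pyRange chAt k i ' ' hik
  simp only [zero_add] at hcons ⊢
  rw [show (List.map (fun s => s.toList.getD i ' ') Motifs) = pvCol Motifs i from rfl]
  have hmapfun : (fun (a : String) =>
        if PySem.List.pyGetD (pyConsensus Motifs) (i : Int) ' ' ≠
            (PySem.Str.pyGet? a (i : Int)).getD ' ' then (1 : Int) else 0) =
      fun a => if chAt (i : Int) ≠ a.toList.getD i ' ' then (1 : Int) else 0 := by
    funext a
    rw [pv_sym_eq a i, hcons]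
  rw [hmapfun]
  have hcolmap : Motifs.map (fun a => if chAt (i : Int) ≠ a.toList.getD i ' ' then (1 : Int) else 0) =
      (pvCol Motifs i).map (fun x => if chAt (i : Int) ≠ x then (1 : Int) else 0) := by
    rw [pvCol, List.map_map]
    rfl
  rw [hcolmap, pv_count_ne, pv_max_eq Motifs hne hall i hik]
  have hlencol : (pvCol Motifs i).length = Motifs.length := by
    simp [pvCol]
  rw [hlencol]

-- ===== VERDICT (by name: the statement is the Claim_ definition above) =====
theorem ScoreWithPseudocounts_spec : Claim_equal_ScoreWithPseudocounts := by
  intro Motifs _ hpre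
  exact pv_main Motifs hpre
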